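-- pv_equiv track=rewrite | github.com/trace86/jhu-aai | AlphaToe/state_mapping/mapping_old.py | diagonal_left_search
-- ===== SOURCE A (Python) =====
-- def diagonal_left_search(i, j, matrix, num_neighbors, symbol):
--     min_i = 0
--     min_j = 0
--     max_i = len(matrix) - 1
--     max_j = len(matrix[0]) - 1
--
--     xs = []
--     for n in range(1, num_neighbors + 1):
--         _i = i - n
--         _j = j - n
--         if _i >= min_i and _j >= min_j and _i <= max_i and _j <= max_j:
--             xs.append(matrix[_i][_j])
--     if len(xs) != num_neighbors:
--         return False
--     return all(item == symbol for item in xs)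
-- ===== SOURCE B (Python) =====
-- def diagonal_left_search(i, j, matrix, num_neighbors, symbol):
--     max_i = len(matrix) - 1
--     max_j = len(matrix[0]) - 1
--     if num_neighbors == 0:
--         return True
--     if num_neighbors < 0:
--         return False
--     if i - num_neighbors < 0 or j - num_neighbors < 0 or i - 1 > max_i or j - 1 > max_j:
--         return False
--     return all(matrix[i - n][j - n] == symbol for n in range(1, num_neighbors + 1))
-- ===== Notes on version B (the rewrite author's own statement) =====
-- stated objective: simpler
-- what changed: B replaces A's collect-into-a-list-then-compare-length pass by an analytic closed-form boundary check (only the extreme offsets 1 and num_neighbors can violate the bounds) followed by a single short-circuiting all() scan, with explicit early returns for num_neighbors == 0 and negative num_neighbors.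
import Mathlib
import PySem

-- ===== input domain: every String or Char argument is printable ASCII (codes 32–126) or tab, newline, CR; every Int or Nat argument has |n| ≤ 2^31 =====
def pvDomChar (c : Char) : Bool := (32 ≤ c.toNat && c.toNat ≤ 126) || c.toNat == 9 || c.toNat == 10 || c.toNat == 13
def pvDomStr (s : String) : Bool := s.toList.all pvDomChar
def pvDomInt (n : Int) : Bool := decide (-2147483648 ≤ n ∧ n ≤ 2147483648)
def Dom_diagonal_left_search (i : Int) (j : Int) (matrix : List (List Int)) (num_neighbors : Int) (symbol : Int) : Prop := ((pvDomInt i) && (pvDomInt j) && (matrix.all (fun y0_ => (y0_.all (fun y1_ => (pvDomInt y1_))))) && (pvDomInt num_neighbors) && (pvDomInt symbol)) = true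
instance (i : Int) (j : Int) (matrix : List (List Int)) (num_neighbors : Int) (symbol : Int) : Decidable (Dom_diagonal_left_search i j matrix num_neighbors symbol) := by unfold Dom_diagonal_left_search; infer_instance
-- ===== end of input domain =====

-- B replaces A's collect-into-a-list-then-compare-length pass by a closed-form boundary
-- check plus a single short-circuiting scan (objective: simpler; same asymptotic cost).

-- ===== PORT A =====
def diagonal_left_search (i : Int) (j : Int) (matrix : List (List Int)) (num_neighbors : Int) (symbol : Int) : Bool :=
  let min_i : Int := 0
  let min_j : Int := 0
  let max_i : Int := (matrix.length : Int) - 1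
  let max_j : Int := ((PySem.List.pyGetD matrix 0 []).length : Int) - 1
  let xs : List Int := (PySem.List.pyRange 1 (num_neighbors + 1) 1).foldl
    (fun xs n =>
      let _i := i - n
      let _j := j - n
      if _i ≥ min_i ∧ _j ≥ min_j ∧ _i ≤ max_i ∧ _j ≤ max_j then
        xs ++ [PySem.List.pyGetD (PySem.List.pyGetD matrix _i []) _j 0]
      else xs) []
  if (xs.length : Int) ≠ num_neighbors then false
  else xs.all (fun item => item == symbol)

-- ===== PORT B =====
def diagonal_left_search_alt (i : Int) (j : Int) (matrix : List (List Int)) (num_neighbors : Int) (symbol : Int) : Bool :=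
  let max_i : Int := (matrix.length : Int) - 1
  let max_j : Int := ((PySem.List.pyGetD matrix 0 []).length : Int) - 1
  if num_neighbors = 0 then true
  else if num_neighbors < 0 then false
  else if i - num_neighbors < 0 ∨ j - num_neighbors < 0 ∨ i - 1 > max_i ∨ j - 1 > max_j then false
  else (PySem.List.pyRange 1 (num_neighbors + 1) 1).all
    (fun n => PySem.List.pyGetD (PySem.List.pyGetD matrix (i - n) []) (j - n) 0 == symbol)

-- ===== PRECONDITION & SPEC =====
-- Pre_ excludes exactly the inputs on which the Python A raises IndexError: the empty
-- matrix (A reads len(matrix[0]) unconditionally), and ragged matrices where some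
-- diagonal cell passes A's bound test (taken against row 0's length) but its own row
-- is too short for the column index.
-- The offsets n ∈ range(1, num_neighbors+1) whose cell passes A's bound test form the
-- interval [max(1, i-(len-1), j-(len₀-1)), min(num_neighbors, i, j)] (length ≤ len(matrix)),
-- so Pre_ quantifies over that interval only.
def Pre_diagonal_left_search (i : Int) (j : Int) (matrix : List (List Int)) (num_neighbors : Int) (symbol : Int) : Prop :=
  matrix ≠ [] ∧
  ∀ n ∈ PySem.List.pyRange
      (max 1 (max (i - ((matrix.length : Int) - 1)) (j - (((PySem.List.pyGetD matrix 0 []).length : Int) - 1))))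
      (min num_neighbors (min i j) + 1) 1,
    j - n < ((matrix.getD (i - n).toNat []).length : Int)
instance (i : Int) (j : Int) (matrix : List (List Int)) (num_neighbors : Int) (symbol : Int) : Decidable (Pre_diagonal_left_search i j matrix num_neighbors symbol) := by unfold Pre_diagonal_left_search; infer_instance

def pvWitness_diagonal_left_search : Int × Int × List (List Int) × Int × Int := (1, 1, [[5, 5], [5, 5]], 1, 5)

def Spec_diagonal_left_search (i : Int) (j : Int) (matrix : List (List Int)) (num_neighbors : Int) (symbol : Int) (out : Bool) : Prop := out = diagonal_left_search_alt i j matrix num_neighbors symbol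
instance (i : Int) (j : Int) (matrix : List (List Int)) (num_neighbors : Int) (symbol : Int) (out : Bool) : Decidable (Spec_diagonal_left_search i j matrix num_neighbors symbol out) := by unfold Spec_diagonal_left_search; infer_instance

-- ===== CLAIM (what is proved, stated in full; the proofs are below) =====
def Claim_equal_diagonal_left_search : Prop := ∀ (i : Int) (j : Int) (matrix : List (List Int)) (num_neighbors : Int) (symbol : Int), Dom_diagonal_left_search i j matrix num_neighbors symbol → Pre_diagonal_left_search i j matrix num_neighbors symbol → Spec_diagonal_left_search i j matrix num_neighbors symbol (diagonal_left_search i j matrix num_neighbors symbol)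

-- ===== LEMMAS AND PROOFS =====

theorem diag_main (i j : Int) (matrix : List (List Int)) (nn symbol : Int) :
    diagonal_left_search i j matrix nn symbol = diagonal_left_search_alt i j matrix nn symbol := by
  unfold diagonal_left_search diagonal_left_search_alt
  dsimp only
  rw [PySem.List.foldl_append_ite]
  simp only [List.nil_append, ge_iff_le]
  set maxi : Int := (matrix.length : Int) - 1 with hmaxi
  set maxj : Int := ((PySem.List.pyGetD matrix 0 []).length : Int) - 1 with hmaxj
  set Pb : Int → Bool := fun n => decide (0 ≤ i - n ∧ 0 ≤ j - n ∧ i - n ≤ maxi ∧ j - n ≤ maxj) with hPb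
  set g : Int → Int := fun n => PySem.List.pyGetD (PySem.List.pyGetD matrix (i - n) []) (j - n) 0 with hg
  rcases lt_trichotomy nn 0 with hneg | h0 | hpos
  · rw [PySem.List.pyRange_one_eq_nil (by omega)]
    simp [hneg]
    omega
  · subst h0
    rw [PySem.List.pyRange_one_eq_nil (by omega)]
    simp
  · have hrange : ∀ n ∈ PySem.List.pyRange 1 (nn + 1) 1, 1 ≤ n ∧ n ≤ nn := by
      intro n hn
      have := (PySem.List.mem_pyRange_one).mp hn
      omega
    by_cases hgd : i - nn < 0 ∨ j - nn < 0 ∨ i - 1 > maxi ∨ j - 1 > maxj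
    · have hbad : ∃ n ∈ PySem.List.pyRange 1 (nn + 1) 1, ¬ Pb n = true := by
        rcases hgd with h | h | h | h
        · exact ⟨nn, PySem.List.mem_pyRange_one.mpr (by omega), by simp [hPb]; omega⟩
        · exact ⟨nn, PySem.List.mem_pyRange_one.mpr (by omega), by simp [hPb]; omega⟩
        · exact ⟨1, PySem.List.mem_pyRange_one.mpr (by omega), by simp [hPb]; omega⟩
        · exact ⟨1, PySem.List.mem_pyRange_one.mpr (by omega), by simp [hPb]; omega⟩
      have hlt := List.length_filter_lt_length_iff_exists.mpr hbad
      rw [PySem.List.length_pyRange_one] at hlt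
      have hne : ((((PySem.List.pyRange 1 (nn + 1) 1).filter Pb).map g).length : Int) ≠ nn := by
        rw [List.length_map]; omega
      rw [if_pos hne, if_neg (by omega : ¬ nn = 0), if_neg (by omega : ¬ nn < 0), if_pos hgd]
    · push Not at hgd
      have hall : ∀ n ∈ PySem.List.pyRange 1 (nn + 1) 1, Pb n = true := by
        intro n hn
        have := hrange n hn
        simp [hPb]; omega
      rw [List.filter_eq_self.mpr hall]
      have hlen : ((((PySem.List.pyRange 1 (nn + 1) 1)).map g).length : Int) = nn := by
        rw [List.length_map, PySem.List.length_pyRange_one]; omega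
      rw [if_neg (by omega : ¬ ((((PySem.List.pyRange 1 (nn + 1) 1)).map g).length : Int) ≠ nn),
        if_neg (by omega : ¬ nn = 0), if_neg (by omega : ¬ nn < 0),
        if_neg (by push Not; exact ⟨by omega, by omega, by omega, by omega⟩ :
          ¬ (i - nn < 0 ∨ j - nn < 0 ∨ i - 1 > maxi ∨ j - 1 > maxj))]
      rw [List.all_map]
      rfl


-- ===== VERDICT (by name: the statement is the Claim_ definition above) =====
theorem diagonal_left_search_spec : Claim_equal_diagonal_left_search := by
  intro i j matrix nn symbol _ _
  exact diag_main i j matrix nn symbol
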